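-- pv_equiv track=rewrite | github.com/murilomonte/atv-tds | 3P/DOT/rev-listas/q05.py | intercalate
-- ===== SOURCE A (Python) =====
-- def intercalate(list_a: list[int], list_b: list[int]) -> list[int]:
--     if len(list_a) == len(list_b):
--         buffer_list: list[int] = []
--         for index in range(len(list_a)):
--             buffer_list.append(list_a[index])
--             buffer_list.append(list_b[index])
--         return buffer_list
--     else:
--         return []
-- ===== SOURCE B (Python) =====
-- def intercalate(list_a: list[int], list_b: list[int]) -> list[int]:
--     if len(list_a) != len(list_b):
--         return []
--     n = len(list_a)
--     result = [0] * (2 * n)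
--     result[0::2] = list_a
--     result[1::2] = list_b
--     return result
-- ===== Notes on version B (the rewrite author's own statement) =====
-- stated objective: alternative
-- what changed: B preallocates a zero buffer of length 2n and fills the even and odd positions with two strided slice assignments, instead of A's index loop growing a list by pairwise appends.
import Mathlib
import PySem

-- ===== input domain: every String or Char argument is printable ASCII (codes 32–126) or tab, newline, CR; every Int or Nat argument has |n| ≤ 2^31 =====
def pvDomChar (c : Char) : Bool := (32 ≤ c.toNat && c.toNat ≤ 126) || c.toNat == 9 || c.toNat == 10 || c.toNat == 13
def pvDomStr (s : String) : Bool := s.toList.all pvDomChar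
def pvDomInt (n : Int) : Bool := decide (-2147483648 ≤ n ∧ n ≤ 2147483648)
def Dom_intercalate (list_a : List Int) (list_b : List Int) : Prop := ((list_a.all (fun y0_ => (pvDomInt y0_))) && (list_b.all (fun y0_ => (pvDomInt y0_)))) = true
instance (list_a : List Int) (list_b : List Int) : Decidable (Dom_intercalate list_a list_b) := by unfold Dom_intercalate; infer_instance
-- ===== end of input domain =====

-- B preallocates a zero buffer of length 2n and fills even/odd positions by strided assignments instead of A's append loop; equal values on all inputs.

-- ===== PORT A =====
def intercalate (list_a : List Int) (list_b : List Int) : List Int :=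
  if list_a.length = list_b.length then
    (PySem.List.pyRange 0 (list_a.length : Int) 1).foldl
      (fun buffer_list index =>
        (buffer_list ++ [PySem.List.pyGetD list_a index 0]) ++ [PySem.List.pyGetD list_b index 0])
      []
  else
    []

-- ===== PORT B =====
-- result = [0] * (2*n); result[0::2] = list_a; result[1::2] = list_b
-- each strided slice assignment is ported as a fold setting position 2*i (resp. 2*i+1) to the i-th element
def intercalate_alt (list_a : List Int) (list_b : List Int) : List Int :=
  if list_a.length ≠ list_b.length then
    []
  else
    let n := list_a.length
    let result := List.replicate (2 * n) 0
    let result := list_a.zipIdx.foldl (fun buf p => buf.set (2 * p.2) p.1) result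
    let result := list_b.zipIdx.foldl (fun buf p => buf.set (2 * p.2 + 1) p.1) result
    result

-- ===== PRECONDITION & SPEC =====
def Spec_intercalate (list_a : List Int) (list_b : List Int) (out : List Int) : Prop := out = intercalate_alt list_a list_b
instance (list_a : List Int) (list_b : List Int) (out : List Int) : Decidable (Spec_intercalate list_a list_b out) := by unfold Spec_intercalate; infer_instance

-- ===== CLAIM (what is proved, stated in full; the proofs are below) =====
def Claim_equal_intercalate : Prop := ∀ (list_a : List Int) (list_b : List Int), Dom_intercalate list_a list_b → Spec_intercalate list_a list_b (intercalate list_a list_b)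

-- ===== LEMMAS AND PROOFS =====

-- setting at an index past a prefix acts on the suffix
theorem set_append_right (pre l : List Int) (m : Nat) (x : Int) :
    (pre ++ l).set (pre.length + m) x = pre ++ l.set m x := by
  induction pre with
  | nil => simp
  | cons p pre ih => simp [Nat.succ_add, ih]

-- the even-stride fold fills positions 2k, 2k+2, … of the zero buffer after a prefix of length 2k
theorem foldl_set_even (a : List Int) :
    ∀ (k : Nat) (pre : List Int), pre.length = 2 * k →
      (a.zipIdx k).foldl (fun buf p => buf.set (2 * p.2) p.1)
          (pre ++ List.replicate (2 * a.length) 0)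
        = pre ++ a.flatMap (fun x => [x, 0]) := by
  induction a with
  | nil => intro k pre _; simp
  | cons x a ih =>
    intro k pre hpre
    have h2 : 2 * (x :: a).length = 2 * a.length + 2 := by
      simp only [List.length_cons]; omega
    rw [h2, List.zipIdx_cons, List.foldl_cons]
    have hrep : List.replicate (2 * a.length + 2) (0 : Int)
        = (0 : Int) :: 0 :: List.replicate (2 * a.length) 0 := by
      rw [show 2 * a.length + 2 = (2 * a.length + 1) + 1 from by omega,
        List.replicate_succ, List.replicate_succ]
    have hset : (pre ++ List.replicate (2 * a.length + 2) (0 : Int)).set (2 * k) x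
        = (pre ++ [x, 0]) ++ List.replicate (2 * a.length) 0 := by
      have h0 := set_append_right pre ((0 : Int) :: 0 :: List.replicate (2 * a.length) 0) 0 x
      rw [Nat.add_zero] at h0
      rw [hrep, ← hpre, h0]
      simp
    rw [hset]
    have := ih (k + 1) (pre ++ [x, 0])
      (by simp only [List.length_append, List.length_cons, List.length_nil, hpre]; omega)
    rw [this]
    simp

-- the odd-stride fold fills positions 2k+1, 2k+3, … of the even-filled buffer after a prefix of length 2k
theorem foldl_set_odd (b : List Int) :
    ∀ (a : List Int), a.length = b.length →
    ∀ (k : Nat) (pre : List Int), pre.length = 2 * k →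
      (b.zipIdx k).foldl (fun buf p => buf.set (2 * p.2 + 1) p.1)
          (pre ++ a.flatMap (fun x => [x, 0]))
        = pre ++ (a.zip b).flatMap (fun p => [p.1, p.2]) := by
  induction b with
  | nil =>
    intro a ha k pre _
    have : a = [] := List.eq_nil_of_length_eq_zero (by simp [ha])
    simp [this]
  | cons y b ih =>
    intro a ha k pre hpre
    cases a with
    | nil => simp at ha
    | cons x a =>
      rw [List.zipIdx_cons, List.foldl_cons]
      have hset : (pre ++ (x :: a).flatMap (fun x => [x, 0])).set (2 * k + 1) y
          = (pre ++ [x, y]) ++ a.flatMap (fun x => [x, 0]) := by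
        rw [show pre ++ (x :: a).flatMap (fun x => [x, 0])
              = (pre ++ [x]) ++ ((0 : Int) :: a.flatMap (fun x => [x, 0])) from by simp,
            show 2 * k + 1 = (pre ++ [x]).length + 0 from by
              simp only [List.length_append, List.length_cons, List.length_nil, hpre],
            set_append_right]
        simp
      rw [hset]
      have := ih a (by simpa using ha) (k + 1) (pre ++ [x, y])
        (by simp only [List.length_append, List.length_cons, List.length_nil, hpre]; omega)
      rw [this]
      simp

-- interleaving by index equals flattening the zip, for equal-length lists (characterises A)
theorem flatMap_range_getD_eq_zip (a : List Int) :
    ∀ (b : List Int), a.length = b.length →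
      (List.range a.length).flatMap (fun k => [a.getD k 0, b.getD k 0])
        = (a.zip b).flatMap (fun pair => [pair.1, pair.2]) := by
  induction a with
  | nil => intro b h; simp
  | cons x a' ih =>
    intro b h
    cases b with
    | nil => simp at h
    | cons y b' =>
      simp only [List.length_cons, List.range_succ_eq_map, List.flatMap_cons,
        List.flatMap_map, List.zip_cons_cons]
      simp only [List.getD_cons_zero, List.getD_cons_succ]
      have := ih b' (by simpa using h)
      simpa [List.flatMap_cons] using this

theorem intercalate_spec_aux (list_a list_b : List Int) :
    intercalate list_a list_b = intercalate_alt list_a list_b := by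
  unfold intercalate intercalate_alt
  by_cases h : list_a.length = list_b.length
  · simp only [h, ne_eq, not_true_eq_false, if_false, if_pos]
    rw [show (fun (buffer_list : List Int) (index : Int) =>
          (buffer_list ++ [PySem.List.pyGetD list_a index 0]) ++ [PySem.List.pyGetD list_b index 0])
        = (fun buffer_list index =>
          buffer_list ++ ([PySem.List.pyGetD list_a index 0] ++ [PySem.List.pyGetD list_b index 0]))
        from by funext acc i; simp]
    rw [PySem.List.foldl_append_eq_flatMap]
    rw [PySem.List.pyRange_one]
    simp only [Int.sub_zero, Int.toNat_natCast, List.flatMap_map, Int.zero_add,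
      PySem.List.pyGetD_natCast, List.singleton_append, List.nil_append]
    rw [← h]
    have hEven := foldl_set_even list_a 0 [] rfl
    simp only [List.nil_append] at hEven
    have hOdd := foldl_set_odd list_b list_a h 0 [] rfl
    simp only [List.nil_append] at hOdd
    rw [hEven, hOdd]
    exact flatMap_range_getD_eq_zip list_a list_b h
  · simp [h]

-- ===== VERDICT (by name: the statement is the Claim_ definition above) =====
theorem intercalate_spec : Claim_equal_intercalate := by
  intro list_a list_b _
  unfold Spec_intercalate
  exact intercalate_spec_aux list_a list_b
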